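-- pv_equiv track=rewrite | github.com/NathrenCZ/Engeto-Online-Python-Akademie | Projekt_2.py | generate_grid
-- ===== SOURCE A (Python) =====
-- def generate_grid(grid_size):
--     """generuje grid dle hodnoty grid_size a
--     vytvoří list v listu který naplní hodnotami (pozicemi)
--       do jednotlivých buněk"""
--     grid = []
--     num = 1
--     for row_index  in range(grid_size):
--         row = []
--         for column_index  in range(grid_size):
--             row.append(str(num))
--             num += 1
--         grid.append(row)
--     return grid
-- ===== SOURCE B (Python) =====
-- def generate_grid(grid_size):
--     """Build the flat list of cell strings once, then reshape it into rows by slicing."""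
--     side = max(grid_size, 0)
--     nums = [str(i) for i in range(1, side * side + 1)]
--     return [nums[r * side:(r + 1) * side] for r in range(side)]
-- ===== Notes on version B (the rewrite author's own statement) =====
-- stated objective: alternative
-- what changed: Replaced the nested counter-and-append loops with a two-phase build: construct the flat list of cell strings once, then reshape it into rows by slicing.
import Mathlib
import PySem

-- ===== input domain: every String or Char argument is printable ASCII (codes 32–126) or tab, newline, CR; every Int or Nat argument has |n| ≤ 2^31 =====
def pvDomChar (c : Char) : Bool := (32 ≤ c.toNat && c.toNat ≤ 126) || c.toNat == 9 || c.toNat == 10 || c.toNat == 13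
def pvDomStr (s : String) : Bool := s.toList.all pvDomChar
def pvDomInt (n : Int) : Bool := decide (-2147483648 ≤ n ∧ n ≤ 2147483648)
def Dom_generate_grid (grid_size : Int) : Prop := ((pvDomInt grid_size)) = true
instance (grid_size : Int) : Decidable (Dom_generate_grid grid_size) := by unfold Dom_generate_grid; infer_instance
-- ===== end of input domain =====

-- B builds the flat list of cell strings once and reshapes it by slicing (different decomposition; same cost).

-- ===== PORT A =====
-- nested counter-and-append loops, transliterated: state (grid, num) / (row, num)
def generate_grid (grid_size : Int) : List (List String) :=
  let st :=
    (PySem.List.pyRange 0 grid_size 1).foldl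
      (fun (st : List (List String) × Int) _ =>
        let inner :=
          (PySem.List.pyRange 0 grid_size 1).foldl
            (fun (rs : List String × Int) _ => (rs.1 ++ [PySem.Int.toStr rs.2], rs.2 + 1))
            ([], st.2)
        (st.1 ++ [inner.1], inner.2))
      ([], 1)
  st.1

-- ===== PORT B =====
-- flat list of strings, then one slicing pass per row
def generate_grid_alt (grid_size : Int) : List (List String) :=
  let side := max grid_size 0
  let nums := (PySem.List.pyRange 1 (side * side + 1) 1).map PySem.Int.toStr
  (PySem.List.pyRange 0 side 1).map
    (fun r => PySem.List.slice nums (some (r * side)) (some ((r + 1) * side)))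

-- ===== PRECONDITION & SPEC =====
def Spec_generate_grid (grid_size : Int) (out : List (List String)) : Prop := out = generate_grid_alt grid_size
instance (grid_size : Int) (out : List (List String)) : Decidable (Spec_generate_grid grid_size out) := by unfold Spec_generate_grid; infer_instance

-- ===== CLAIM (what is proved, stated in full; the proofs are below) =====
def Claim_equal_generate_grid : Prop := ∀ (grid_size : Int), Dom_generate_grid grid_size → Spec_generate_grid grid_size (generate_grid grid_size)

-- ===== LEMMAS AND PROOFS =====

-- A's inner loop: appends str(num), …, str(num+len-1) and leaves num advanced by len
theorem gg_inner (l : List Int) (acc : List String) (num : Int) :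
    l.foldl (fun (rs : List String × Int) _ => (rs.1 ++ [PySem.Int.toStr rs.2], rs.2 + 1)) (acc, num)
    = (acc ++ (List.range l.length).map (fun k : Nat => PySem.Int.toStr (num + (k : Int))),
       num + l.length) := by
  induction l generalizing acc num with
  | nil => simp
  | cons a tl ih =>
      simp only [List.foldl_cons, ih, List.length_cons]
      rw [Prod.mk.injEq]
      constructor
      · rw [List.range_succ_eq_map]
        simp only [List.map_cons, List.map_map, List.append_assoc,
          Nat.cast_zero, add_zero, List.singleton_append]
        congr 2
        refine List.map_congr_left (fun k _ => ?_)
        simp only [Function.comp_apply]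
        congr 1
        push_cast
        ring
      · push_cast; ring

-- A's outer loop, with the inner loop summarised by gg_inner
theorem gg_outer (m : Nat) (inner : List Int) (him : inner.length = m)
    (l : List Int) (acc : List (List String)) (num : Int) :
    l.foldl
      (fun (st : List (List String) × Int) _ =>
        let r := inner.foldl (fun (rs : List String × Int) _ => (rs.1 ++ [PySem.Int.toStr rs.2], rs.2 + 1)) ([], st.2)
        (st.1 ++ [r.1], r.2)) (acc, num)
    = (acc ++ (List.range l.length).map
        (fun r : Nat => (List.range m).map
          (fun k : Nat => PySem.Int.toStr (num + (r : Int) * (m : Int) + (k : Int)))),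
       num + (l.length : Int) * (m : Int)) := by
  induction l generalizing acc num with
  | nil => simp
  | cons a tl ih =>
      rw [List.foldl_cons, ih, gg_inner, him]
      dsimp only [List.nil_append, List.length_cons]
      rw [Prod.mk.injEq]
      constructor
      · rw [List.range_succ_eq_map]
        simp only [List.map_cons, List.map_map, List.append_assoc,
          Nat.cast_zero, zero_mul, add_zero, List.singleton_append]
        congr 2
        refine List.map_congr_left (fun r _ => ?_)
        simp only [Function.comp_apply]
        refine List.map_congr_left (fun k _ => ?_)
        congr 1
        push_cast
        ring
      · push_cast; ring

theorem generate_grid_canon (grid_size : Int) :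
    generate_grid grid_size
    = (List.range grid_size.toNat).map
        (fun r : Nat => (List.range grid_size.toNat).map
          (fun k : Nat => PySem.Int.toStr (1 + (r : Int) * (grid_size.toNat : Int) + (k : Int)))) := by
  unfold generate_grid
  rw [gg_outer grid_size.toNat (PySem.List.pyRange 0 grid_size 1)
      (by simp [PySem.List.length_pyRange_one])]
  simp [PySem.List.length_pyRange_one]

theorem generate_grid_alt_canon (grid_size : Int) :
    generate_grid_alt grid_size
    = (List.range grid_size.toNat).map
        (fun r : Nat => (List.range grid_size.toNat).map
          (fun k : Nat => PySem.Int.toStr (1 + (r : Int) * (grid_size.toNat : Int) + (k : Int)))) := by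
  unfold generate_grid_alt
  by_cases h : grid_size ≤ 0
  · rw [show max grid_size 0 = 0 from max_eq_right h]
    dsimp only
    rw [show PySem.List.pyRange 0 0 1 = [] from PySem.List.pyRange_one_eq_nil (by omega)]
    simp [Int.toNat_of_nonpos h]
  · rw [show max grid_size 0 = grid_size from max_eq_left (by omega)]
    dsimp only
    have hn : grid_size = (grid_size.toNat : Int) := by omega
    have hflat : (grid_size * grid_size).toNat = grid_size.toNat * grid_size.toNat := by
      conv_lhs => rw [hn]
      rw [← Nat.cast_mul, Int.toNat_natCast]
    rw [PySem.List.pyRange_one 0 grid_size, PySem.List.pyRange_one 1 (grid_size * grid_size + 1)]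
    simp only [List.map_map, Int.sub_zero, add_sub_cancel_right]
    apply List.ext_getElem
    · simp
    intro r hr hr'
    have hrn : r < grid_size.toNat := by simpa using hr'
    have key : r * grid_size.toNat + grid_size.toNat ≤ grid_size.toNat * grid_size.toNat := by
      have h1 : (r + 1) * grid_size.toNat ≤ grid_size.toNat * grid_size.toNat :=
        Nat.mul_le_mul_right _ (Nat.succ_le_of_lt hrn)
      rwa [add_mul, one_mul] at h1
    simp only [List.getElem_map, List.getElem_range, Function.comp_apply]
    have hb : ((0:Int) + (r:Int)) * grid_size = ((r * grid_size.toNat : Nat) : Int) := by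
      conv_lhs => rw [hn]
      push_cast
      ring
    have hb' : ((0:Int) + (r:Int) + 1) * grid_size
        = ((r * grid_size.toNat : Nat) : Int) + ((grid_size.toNat : Nat) : Int) := by
      conv_lhs => rw [hn]
      push_cast
      ring
    rw [hb, hb', PySem.List.slice_natCast_add]
    apply List.ext_getElem
    · simp only [List.length_take, List.length_drop, List.length_map, List.length_range, hflat]
      omega
    intro c hc hc'
    have hcn : c < grid_size.toNat := by simpa using hc'
    simp only [List.getElem_take, List.getElem_drop, List.getElem_map, List.getElem_range,
      Function.comp_apply]
    congr 1
    push_cast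
    ring

-- ===== VERDICT (by name: the statement is the Claim_ definition above) =====
theorem generate_grid_spec : Claim_equal_generate_grid := by
  intro gs _
  unfold Spec_generate_grid
  rw [generate_grid_canon, generate_grid_alt_canon]
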